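-- pv_equiv track=rewrite | github.com/autolabhq/autolab | tasks/discover_sorting/environment/main.py | is_sorted_mask
-- ===== SOURCE A (Python) =====
-- N = 16
--
-- def is_sorted_mask(mask, n=N):
--     seen_one = False
--     for wire in range(n):
--         bit = (mask >> wire) & 1
--         if bit:
--             seen_one = True
--         elif seen_one:
--             return False
--     return True
-- ===== SOURCE B (Python) =====
-- N = 16
--
-- def is_sorted_mask(mask, n=N):
--     # closed form: the low n bits are zeros-then-ones iff their value m is
--     # 2**n - 2**k for some k, i.e. m == 0 or (2**n - m) is a power of two
--     # (equivalently a divisor of 2**n).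
--     if n <= 0:
--         return True
--     full = 1 << n
--     m = mask % full
--     if m == 0:
--         return True
--     return full % (full - m) == 0
-- ===== Notes on version B (the rewrite author's own statement) =====
-- stated objective: alternative
-- what changed: Replaces the bit-by-bit scan with a seen-one flag by a closed-form arithmetic test: the low n bits are zeros-then-ones iff their value m satisfies m == 0 or (2**n - m) divides 2**n (i.e. is a power of two), computed with one modulo and one divisibility check instead of a loop over n bits.
import Mathlib
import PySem

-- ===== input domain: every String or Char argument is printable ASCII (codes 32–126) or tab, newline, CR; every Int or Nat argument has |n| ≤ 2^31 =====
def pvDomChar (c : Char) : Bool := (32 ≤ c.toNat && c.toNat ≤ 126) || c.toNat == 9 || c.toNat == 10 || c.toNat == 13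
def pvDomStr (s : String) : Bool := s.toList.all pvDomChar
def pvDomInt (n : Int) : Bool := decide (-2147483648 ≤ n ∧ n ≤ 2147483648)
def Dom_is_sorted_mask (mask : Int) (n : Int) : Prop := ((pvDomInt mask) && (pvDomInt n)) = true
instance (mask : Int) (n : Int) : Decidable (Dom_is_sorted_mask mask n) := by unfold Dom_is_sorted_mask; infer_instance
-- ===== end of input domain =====

-- B replaces A's bit-by-bit scan with a closed-form arithmetic test: the low n bits
-- are zeros-then-ones iff their value m is 0 or 2^n - m divides 2^n.

-- ===== PORT A =====
-- loop over 'for wire in range(n)' with early return False; 'wire' is always ≥ 0,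
-- so 'mask >> wire' is ported as 'mask >>> w.toNat' (exact).
def isSortedLoopA (mask : Int) (n : Int) (w : Int) (seen : Bool) : Bool :=
  if _h : w < n then
    let bit := PySem.Int.band (mask >>> w.toNat) 1
    if bit ≠ 0 then isSortedLoopA mask n (w+1) true
    else if seen then false
    else isSortedLoopA mask n (w+1) seen
  else true
termination_by (n - w).toNat
decreasing_by all_goals omega

def is_sorted_mask (mask : Int) (n : Int) : Bool :=
  isSortedLoopA mask n 0 false

-- ===== PORT B =====
-- '1 << n' is only reached when 0 < n, so the shift amount is ported as n.toNat (exact).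
def is_sorted_mask_alt (mask : Int) (n : Int) : Bool :=
  if n ≤ 0 then true
  else
    let full : Int := (1 : Int) <<< n.toNat
    let m := PySem.Int.mod mask full
    if m = 0 then true
    else PySem.Int.mod full (full - m) == 0

-- ===== PRECONDITION & SPEC =====
def Spec_is_sorted_mask (mask : Int) (n : Int) (out : Bool) : Prop := out = is_sorted_mask_alt mask n
instance (mask : Int) (n : Int) (out : Bool) : Decidable (Spec_is_sorted_mask mask n out) := by unfold Spec_is_sorted_mask; infer_instance

-- ===== CLAIM (what is proved, stated in full; the proofs are below) =====
def Claim_equal_is_sorted_mask : Prop := ∀ (mask : Int) (n : Int), Dom_is_sorted_mask mask n → Spec_is_sorted_mask mask n (is_sorted_mask mask n)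

-- ===== LEMMAS AND PROOFS =====

-- the loop of A, rephrased on the Nat value t of the remaining low bits
def sortedNat : Nat → Nat → Bool → Bool
  | _, 0, _ => true
  | t, k+1, s =>
    if t % 2 = 1 then sortedNat (t/2) k true
    else if s then false else sortedNat (t/2) k s

lemma emod_two_pow_succ_div_two (M : Int) (k : Nat) :
    (M % (2^(k+1))) / 2 = (M / 2) % (2^k) := by
  have hP : (0:Int) < 2^k := by positivity
  have h2 : (2:Int)^(k+1) = 2 * 2^k := by ring
  have hr0 : 0 ≤ M % (2^(k+1)) := Int.emod_nonneg M (by positivity)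
  have hrlt : M % (2^(k+1)) < 2^(k+1) := Int.emod_lt_of_pos M (by positivity)
  have hadd := Int.ediv_add_emod M (2^(k+1))
  obtain ⟨Q, hQ'⟩ : ∃ Q, (2:Int)^k * (M / 2^(k+1)) = Q := ⟨_, rfl⟩
  have hs : (2:Int)^(k+1) * (M / 2^(k+1)) = 2 * Q := by rw [← hQ']; ring
  have hQ : M = 2 * Q + M % (2^(k+1)) := by linarith
  have hdiv : M / 2 = Q + M % (2^(k+1)) / 2 := by omega
  rw [hdiv, show Q + M % (2^(k+1))/2 = M % (2^(k+1))/2 + Q from by ring, ← hQ',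
    Int.add_mul_emod_self_left]
  exact (Int.emod_eq_of_lt (by omega) (by omega)).symm

lemma emod_two_pow_succ_mod_two (M : Int) (k : Nat) :
    (M % (2^(k+1))) % 2 = M % 2 := by
  exact Int.emod_emod_of_dvd M ⟨2^k, by ring⟩

-- A's loop from wire a with n = a + k remaining bound equals sortedNat on the low k bits of mask >>> a
lemma loopA_eq_sortedNat (mask : Int) :
    ∀ (k a : Nat) (s : Bool),
      isSortedLoopA mask ((a : Int) + (k : Int)) (a : Int) s
        = sortedNat ((mask >>> a) % (2^k)).toNat k s := by
  intro k
  induction k with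
  | zero =>
    intro a s
    rw [isSortedLoopA]
    simp [sortedNat, show ¬((a : Int) < (a : Int) + ((0:Nat) : Int)) from by omega]
  | succ k ih =>
    intro a s
    rw [isSortedLoopA]
    rw [dif_pos (show (a : Int) < (a : Int) + ((k+1 : Nat) : Int) from by push_cast; omega)]
    set M := mask >>> a with hMdef
    have hbit : PySem.Int.band (mask >>> ((a : Int)).toNat) 1 = M % 2 := by
      rw [PySem.Int.band_one, PySem.Int.mod_eq_emod_of_pos (by norm_num : (0:Int) < 2)]
      simp [hMdef]
    have ht : ((M % (2^(k+1))).toNat) % 2 = (M % 2).toNat := by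
      have h0 : 0 ≤ M % (2^(k+1)) := Int.emod_nonneg M (by positivity)
      have hb0 : 0 ≤ M % 2 := Int.emod_nonneg M (by norm_num)
      have hb1 : M % 2 < 2 := Int.emod_lt_of_pos M (by norm_num)
      have := emod_two_pow_succ_mod_two M k
      omega
    have htd : ((M % (2^(k+1))).toNat) / 2 = ((M / 2) % (2^k)).toNat := by
      have h0 : 0 ≤ M % (2^(k+1)) := Int.emod_nonneg M (by positivity)
      have h1 : 0 ≤ (M / 2) % (2^k) := Int.emod_nonneg _ (by positivity)
      have := emod_two_pow_succ_div_two M k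
      omega
    have hshift : mask >>> (a + 1) = M / 2 := by
      rw [Int.shiftRight_add, hMdef.symm]
      rw [Int.shiftRight_eq_div_pow]
      norm_num
    have hrest : ∀ s', isSortedLoopA mask ((a : Int) + ((k+1 : Nat) : Int)) ((a : Int) + 1) s'
        = sortedNat (((M / 2) % (2^k)).toNat) k s' := by
      intro s'
      have := ih (a + 1) s'
      rw [hshift] at this
      have hcast1 : ((a + 1 : Nat) : Int) = (a : Int) + 1 := by push_cast; ring
      have hcast2 : ((a : Int) + 1) + (k : Int) = (a : Int) + ((k+1 : Nat) : Int) := by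
        push_cast; ring
      rw [hcast1, hcast2] at this
      exact this
    have hb0 : M % 2 = 0 ∨ M % 2 = 1 := by omega
    simp only [hbit]
    rcases hb0 with h | h
    · have ht' : ((M % (2^(k+1))).toNat) % 2 = 0 := by rw [ht, h]; rfl
      cases s with
      | true =>
        rw [h]
        have hR : sortedNat ((M % (2^(k+1))).toNat) (k+1) true = false := by
          simp [sortedNat, ht']
        rw [hR]
        norm_num
      | false =>
        rw [h]
        have hR : sortedNat ((M % (2^(k+1))).toNat) (k+1) false
            = sortedNat (((M / 2) % (2^k)).toNat) k false := by
          simp [sortedNat, ht', htd]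
        rw [hR, ← hrest false]
        norm_num
    · rw [h]
      have ht' : ((M % (2^(k+1))).toNat) % 2 = 1 := by rw [ht, h]; rfl
      have hR : sortedNat ((M % (2^(k+1))).toNat) (k+1) s
          = sortedNat (((M / 2) % (2^k)).toNat) k true := by
        simp [sortedNat, ht', htd]
      rw [hR, ← hrest true]
      norm_num

lemma sortedNat_true_iff : ∀ (k t : Nat), t < 2^k → (sortedNat t k true = true ↔ t = 2^k - 1) := by
  intro k
  induction k with
  | zero => intro t ht; simp [sortedNat]; omega
  | succ k ih =>
    intro t ht
    have hP : 0 < 2^k := Nat.two_pow_pos k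
    have h2 : 2^(k+1) = 2 * 2^k := by ring
    by_cases hodd : t % 2 = 1
    · simp only [sortedNat, hodd, if_true]
      rw [ih (t/2) (by omega)]
      omega
    · simp [sortedNat, hodd]
      omega

lemma sortedNat_false_iff : ∀ (k t : Nat), t < 2^k →
    (sortedNat t k false = true ↔ (t = 0 ∨ (2^k - t) ∣ 2^k)) := by
  intro k
  induction k with
  | zero => intro t ht; simp [sortedNat]; omega
  | succ k ih =>
    intro t ht
    have hP : 0 < 2^k := Nat.two_pow_pos k
    have h2 : 2^(k+1) = 2 * 2^k := by ring
    by_cases hodd : t % 2 = 1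
    · simp only [sortedNat, hodd, if_true]
      rw [sortedNat_true_iff k (t/2) (by omega)]
      constructor
      · intro h
        right
        have : 2^(k+1) - t = 1 := by omega
        rw [this]; exact one_dvd _
      · rintro (h | h)
        · omega
        · -- an odd divisor of 2^(k+1) is 1
          have hdodd : (2^(k+1) - t) % 2 = 1 := by omega
          obtain ⟨j, hj, hdj⟩ := (Nat.dvd_prime_pow Nat.prime_two).mp h
          have : j = 0 := by
            by_contra hj0
            obtain ⟨j', rfl⟩ := Nat.exists_eq_succ_of_ne_zero hj0
            have : 2^(j'+1) = 2 * 2^j' := by ring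
            omega
          subst this
          simp at hdj
          omega
    · simp only [sortedNat, hodd, if_false, Bool.false_eq_true]
      rw [ih (t/2) (by omega)]
      have heven : t % 2 = 0 := by omega
      constructor
      · rintro (h | h)
        · left; omega
        · right
          have hd : 2^(k+1) - t = 2 * (2^k - t/2) := by omega
          rw [hd, h2]
          exact Nat.mul_dvd_mul_left 2 h
      · rintro (h | h)
        · left; omega
        · right
          have hd : 2^(k+1) - t = 2 * (2^k - t/2) := by omega
          rw [hd, h2] at h
          exact (Nat.mul_dvd_mul_iff_left (by norm_num : 0 < 2)).mp h

-- characterisation of A for positive n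
lemma portA_char (mask n : Int) (hn : 0 < n) :
    is_sorted_mask mask n = sortedNat ((mask % (2^n.toNat)).toNat) n.toNat false := by
  unfold is_sorted_mask
  have := loopA_eq_sortedNat mask n.toNat 0 false
  simp only [Nat.cast_zero, zero_add, Int.shiftRight_zero] at this
  rw [show n = ((n.toNat : Nat) : Int) from by omega]
  exact this

-- characterisation of B for positive n
lemma portB_char (mask n : Int) (hn : 0 < n) :
    is_sorted_mask_alt mask n
      = decide ((mask % (2^n.toNat)).toNat = 0 ∨
          (2^n.toNat - (mask % (2^n.toNat)).toNat) ∣ 2^n.toNat) := by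
  unfold is_sorted_mask_alt
  rw [if_neg (by omega)]
  have hfull : (1 : Int) <<< n.toNat = (2:Int)^n.toNat := by
    rw [Int.shiftLeft_eq]; ring
  have hpos : (0:Int) < 2^n.toNat := by positivity
  have hmod : PySem.Int.mod mask ((1:Int) <<< n.toNat) = mask % (2^n.toNat) := by
    rw [hfull, PySem.Int.mod_eq_emod_of_pos hpos]
  set t : Int := mask % (2^n.toNat) with htdef
  have ht0 : 0 ≤ t := Int.emod_nonneg mask (by positivity)
  have htlt : t < 2^n.toNat := Int.emod_lt_of_pos mask hpos
  have hcastpow : ((2^n.toNat : Nat) : Int) = (2:Int)^n.toNat := by push_cast; ring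
  simp only [hmod]
  by_cases hz : t = 0
  · rw [if_pos hz]
    have : (t.toNat = 0 ∨ (2^n.toNat - t.toNat) ∣ 2^n.toNat) := by left; omega
    exact (decide_eq_true this).symm
  · rw [if_neg hz]
    have hcast : (1:Int) <<< n.toNat - t = ((2^n.toNat - t.toNat : Nat) : Int) := by
      rw [hfull]; omega
    have hdvd : PySem.Int.mod ((1:Int) <<< n.toNat) ((1:Int) <<< n.toNat - t) = 0
        ↔ ((2^n.toNat - t.toNat) ∣ 2^n.toNat) := by
      rw [PySem.Int.mod_eq_zero_iff_dvd, hcast, hfull, ← hcastpow]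
      exact Int.natCast_dvd_natCast
    have hne0 : t.toNat ≠ 0 := by omega
    by_cases hdv : (2^n.toNat - t.toNat) ∣ 2^n.toNat
    · have hm0 : PySem.Int.mod ((1:Int) <<< n.toNat) ((1:Int) <<< n.toNat - t) = 0 := hdvd.mpr hdv
      simp [hm0, hdv]
    · have hm0 : PySem.Int.mod ((1:Int) <<< n.toNat) ((1:Int) <<< n.toNat - t) ≠ 0 :=
        fun hc => hdv (hdvd.mp hc)
      simp [hm0, hdv, hne0]

-- ===== VERDICT (by name: the statement is the Claim_ definition above) =====
theorem is_sorted_mask_spec : Claim_equal_is_sorted_mask := by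
  intro mask n _
  unfold Spec_is_sorted_mask
  by_cases hn : n ≤ 0
  · unfold is_sorted_mask is_sorted_mask_alt
    rw [isSortedLoopA, dif_neg (by omega), if_pos hn]
  · have hn : 0 < n := by omega
    rw [portA_char mask n hn, portB_char mask n hn]
    have hlt : (mask % (2^n.toNat)).toNat < 2^n.toNat := by
      have h0 : 0 ≤ mask % ((2:Int)^n.toNat) := Int.emod_nonneg mask (by positivity)
      have h1 : mask % ((2:Int)^n.toNat) < (2:Int)^n.toNat := Int.emod_lt_of_pos mask (by positivity)
      have hc : ((2^n.toNat : Nat) : Int) = (2:Int)^n.toNat := by push_cast; ring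
      omega
    by_cases hok : ((mask % (2^n.toNat)).toNat = 0 ∨
        (2^n.toNat - (mask % (2^n.toNat)).toNat) ∣ 2^n.toNat)
    · have hA : sortedNat ((mask % (2^n.toNat)).toNat) n.toNat false = true :=
        (sortedNat_false_iff n.toNat _ hlt).mpr hok
      rw [hA, decide_eq_true hok]
    · have hA : sortedNat ((mask % (2^n.toNat)).toNat) n.toNat false ≠ true :=
        fun hc => hok ((sortedNat_false_iff n.toNat _ hlt).mp hc)
      have hA' : sortedNat ((mask % (2^n.toNat)).toNat) n.toNat false = false :=
        Bool.not_eq_true _ ▸ (Bool.eq_false_iff.mpr (by simpa using hA))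
      rw [hA', decide_eq_false hok]
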